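-- pv_equiv track=rewrite | github.com/L200170103/prak_ASD_C | Modul_1/latihan1-11_no-3a.py | jmlVokal
-- ===== SOURCE A (Python) =====
-- def jmlVokal(string):
--     vkl = 0
--     a = "Kartasura"
--     for car in string.lower():
--         if car in a:
--             vkl += 1
--     vokal = len(string)
--     return(vokal,vkl)
-- ===== SOURCE B (Python) =====
-- def jmlVokal(string):
--     cnt = {}
--     for c in string.lower():
--         cnt[c] = cnt.get(c, 0) + 1
--     vkl = 0
--     for c in set("Kartasura"):
--         vkl += cnt.get(c, 0)
--     return (len(string), vkl)
-- ===== Notes on version B (the rewrite author's own statement) =====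
-- stated objective: alternative
-- what changed: B builds a full character-frequency table of the lowercased string in one pass and then sums the counts of the distinct target characters, instead of testing each input character for membership in the target string inside the loop.
import Mathlib
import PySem

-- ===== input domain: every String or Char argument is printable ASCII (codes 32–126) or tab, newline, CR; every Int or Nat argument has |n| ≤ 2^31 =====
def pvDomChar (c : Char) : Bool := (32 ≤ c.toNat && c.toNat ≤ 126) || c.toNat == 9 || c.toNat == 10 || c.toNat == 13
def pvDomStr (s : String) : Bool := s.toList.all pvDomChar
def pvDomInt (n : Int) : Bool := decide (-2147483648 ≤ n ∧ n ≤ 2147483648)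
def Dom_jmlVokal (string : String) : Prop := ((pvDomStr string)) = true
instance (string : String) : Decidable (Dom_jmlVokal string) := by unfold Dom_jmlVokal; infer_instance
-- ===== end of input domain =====

-- B replaces the per-character membership test with a frequency table summed over the distinct target characters (alternative decomposition, same result).

-- ===== PORT A =====
def jmlVokal (string : String) : Int × Int :=
  let a : String := "Kartasura"
  let vkl : Int := (PySem.Str.lower string).toList.foldl
    (fun vkl car => if PySem.Chars.isIn [car] a.toList then vkl + 1 else vkl) 0
  (PySem.Str.len string, vkl)

-- ===== PORT B =====
def jmlVokal_alt (string : String) : Int × Int :=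
  let cnt : PySem.Dict Char Int := (PySem.Str.lower string).toList.foldl
    (fun d c => d.insert c (d.getD c 0 + 1)) PySem.Dict.empty
  let vkl : Int := (PySem.Set.ofList "Kartasura".toList).foldl
    (fun s c => s + cnt.getD c 0) 0
  (PySem.Str.len string, vkl)

-- ===== PRECONDITION & SPEC =====
def Spec_jmlVokal (string : String) (out : Int × Int) : Prop := out = jmlVokal_alt string
instance (string : String) (out : Int × Int) : Decidable (Spec_jmlVokal string out) := by unfold Spec_jmlVokal; infer_instance

-- ===== CLAIM (what is proved, stated in full; the proofs are below) =====
def Claim_equal_jmlVokal : Prop := ∀ (string : String), Dom_jmlVokal string → Spec_jmlVokal string (jmlVokal string)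

-- ===== LEMMAS AND PROOFS =====

lemma isIn_singleton_iff_mem (c : Char) (s : List Char) :
    PySem.Chars.isIn [c] s = true ↔ c ∈ s := by
  rw [PySem.Chars.isIn_iff_infix]
  constructor
  · intro h; exact List.singleton_sublist.mp h.sublist
  · intro h
    obtain ⟨l1, l2, rfl⟩ := List.append_of_mem h
    exact ⟨l1, l2, by simp⟩

lemma kartasura_mem_iff (x : Char) :
    x ∈ "Kartasura".toList ↔ x ∈ (['K','a','r','t','s','u'] : List Char) := by
  rw [show "Kartasura".toList = ['K','a','r','t','a','s','u','r','a'] from rfl]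
  simp only [List.mem_cons, List.not_mem_nil, or_false]
  tauto

lemma key_count (l : List Char) :
    (l.countP (fun c => PySem.Chars.isIn [c] "Kartasura".toList) : Int)
      = (l.count 'K' : Int) + l.count 'a' + l.count 'r' + l.count 't'
        + l.count 's' + l.count 'u' := by
  induction l with
  | nil => simp
  | cons c l ih =>
    have hc : PySem.Chars.isIn [c] "Kartasura".toList
        = decide (c ∈ (['K','a','r','t','s','u'] : List Char)) := by
      cases hI : PySem.Chars.isIn [c] "Kartasura".toList with
      | false =>
        symm; rw [decide_eq_false_iff_not]
        intro hm
        have := (isIn_singleton_iff_mem c _).mpr ((kartasura_mem_iff c).mpr hm)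
        rw [hI] at this; exact Bool.false_ne_true this
      | true =>
        symm; rw [decide_eq_true_eq]
        exact (kartasura_mem_iff c).mp ((isIn_singleton_iff_mem c _).mp hI)
    simp only [List.countP_cons, List.count_cons, hc]
    push_cast
    rw [show "Kartasura".toList = ['K','a','r','t','a','s','u','r','a'] from rfl] at ih
    rw [ih]
    by_cases hm : c ∈ (['K','a','r','t','s','u'] : List Char)
    · rw [if_pos (show decide (c ∈ (['K','a','r','t','s','u'] : List Char)) = true by simpa using hm)]
      simp only [List.mem_cons, List.not_mem_nil, or_false] at hm
      rcases hm with rfl | rfl | rfl | rfl | rfl | rfl <;> simp <;> ring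
    · rw [if_neg (by simpa using hm)]
      simp only [List.mem_cons, List.not_mem_nil, or_false, not_or] at hm
      obtain ⟨n1, n2, n3, n4, n5, n6⟩ := hm
      simp only [beq_iff_eq, if_neg n1, if_neg n2, if_neg n3, if_neg n4, if_neg n5, if_neg n6]
      ring

-- ===== VERDICT (by name: the statement is the Claim_ definition above) =====
theorem jmlVokal_spec : Claim_equal_jmlVokal := by
  intro string _
  show jmlVokal string = jmlVokal_alt string
  simp only [jmlVokal, jmlVokal_alt]
  congr 1
  rw [PySem.List.foldl_if_add_one, PySem.Dict.foldl_insert_getD_add_one_eq_counter]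
  rw [show (PySem.Set.ofList "Kartasura".toList) = ['K','a','r','t','s','u'] from by decide]
  simp only [List.foldl_cons, List.foldl_nil, PySem.Dict.getD_counter]
  rw [key_count]
  ring
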